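-- pv_equiv track=rewrite | github.com/ECGustavson/Billing-Program | IsBilled.py | extract_custom_fields
-- ===== SOURCE A (Python) =====
-- FIELD_ORDER  = "Order Number"
--
-- FIELD_PO     = "PO Number"
--
-- FIELD_QUOTE  = "Quote Number"
--
-- SEARCH_FIELDS = (FIELD_ORDER, FIELD_PO, FIELD_QUOTE)
--
-- def extract_custom_fields(invoice: dict) -> dict:
--     """
--     Extract all three tracked custom field values from an invoice.
--     Returns a dict with keys: order_no, po_no, quote_no.
--     Any field not present on the invoice is returned as an empty string.
--     """
--     field_map = {f.lower(): f for f in SEARCH_FIELDS}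
--     values = {f: "" for f in SEARCH_FIELDS}
--
--     for cf in invoice.get("CustomField", []):
--         name = cf.get("Name", "").strip().lower()
--         if name in field_map:
--             values[field_map[name]] = cf.get("StringValue", "").strip()
--
--     return {
--         "order_no":  values[FIELD_ORDER],
--         "po_no":     values[FIELD_PO],
--         "quote_no":  values[FIELD_QUOTE],
--     }
-- ===== SOURCE B (Python) =====
-- FIELD_ORDER  = "Order Number"
-- FIELD_PO     = "PO Number"
-- FIELD_QUOTE  = "Quote Number"
-- SEARCH_FIELDS = (FIELD_ORDER, FIELD_PO, FIELD_QUOTE)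
--
-- def extract_custom_fields(invoice: dict) -> dict:
--     """No dict indexing at all: for each tracked field, scan the custom-field
--     list backwards for the most recent matching entry ('last write wins')."""
--     cfs = invoice.get("CustomField", [])
--
--     def last_value(target):
--         for cf in reversed(cfs):
--             if cf.get("Name", "").strip().lower() == target:
--                 return cf.get("StringValue", "").strip()
--         return ""
--
--     return {
--         "order_no": last_value("order number"),
--         "po_no":    last_value("po number"),
--         "quote_no": last_value("quote number"),
--     }
-- ===== Notes on version B (the rewrite author's own statement) =====
-- stated objective: alternative
-- what changed: B builds no dict at all: instead of A's forward pass populating field_map/values dicts, it performs three independent backward scans of the custom-field list, each returning the value of the last entry whose normalized name matches the target (last write wins), with early exit on the first hit from the end.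
import Mathlib
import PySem

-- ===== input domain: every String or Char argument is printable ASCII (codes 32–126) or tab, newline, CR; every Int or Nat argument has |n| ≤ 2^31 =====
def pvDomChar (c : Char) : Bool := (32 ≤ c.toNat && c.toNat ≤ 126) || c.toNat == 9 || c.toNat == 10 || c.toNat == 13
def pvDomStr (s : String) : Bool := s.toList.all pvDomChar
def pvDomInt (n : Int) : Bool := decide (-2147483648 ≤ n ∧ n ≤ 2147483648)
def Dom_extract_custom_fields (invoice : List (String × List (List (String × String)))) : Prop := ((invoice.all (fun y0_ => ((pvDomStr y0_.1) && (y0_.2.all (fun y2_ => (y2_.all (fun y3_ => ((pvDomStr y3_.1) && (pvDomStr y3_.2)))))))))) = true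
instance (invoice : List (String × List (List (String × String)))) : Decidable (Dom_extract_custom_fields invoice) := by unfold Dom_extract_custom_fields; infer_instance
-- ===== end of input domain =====

-- B uses no dict at all: one backward scan of the custom-field list per tracked field,
-- returning the last matching entry's stripped value; A populates filter dicts forward.
-- Return-value equivalence only (neither mutates its argument).

-- ===== PORT A =====
def pvFieldOrder : String := "Order Number"
def pvFieldPO : String := "PO Number"
def pvFieldQuote : String := "Quote Number"
def pvSearchFields : List String := [pvFieldOrder, pvFieldPO, pvFieldQuote]

-- normalized name / stripped value of one custom-field dict (shared phrasing of
-- cf.get("Name","").strip().lower() and cf.get("StringValue","").strip())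
def pvName (cf : List (String × String)) : String :=
  PySem.Str.lower (PySem.Str.strip ((PySem.Dict.mk cf).getD "Name" ""))
def pvSV (cf : List (String × String)) : String :=
  PySem.Str.strip ((PySem.Dict.mk cf).getD "StringValue" "")

def extract_custom_fields (invoice : List (String × List (List (String × String)))) : List (String × String) :=
  let fieldMap : PySem.Dict String String :=
    PySem.Dict.ofList (pvSearchFields.map (fun f => (PySem.Str.lower f, f)))
  let values0 : PySem.Dict String String :=
    PySem.Dict.ofList (pvSearchFields.map (fun f => (f, "")))
  let cfs := (PySem.Dict.mk invoice).getD "CustomField" []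
  let values := cfs.foldl (fun v cf =>
    let name := pvName cf
    if fieldMap.contains name then v.insert (fieldMap.getD name "") (pvSV cf) else v) values0
  [("order_no", values.getD pvFieldOrder ""),
   ("po_no", values.getD pvFieldPO ""),
   ("quote_no", values.getD pvFieldQuote "")]

-- ===== PORT B =====
-- 'for cf in reversed(cfs): if name == target: return value' / 'return ""'
def pvLastVal (target : String) : List (List (String × String)) → String
  | [] => ""
  | cf :: rest => if pvName cf = target then pvSV cf else pvLastVal target rest

def extract_custom_fields_alt (invoice : List (String × List (List (String × String)))) : List (String × String) :=
  let cfs := (PySem.Dict.mk invoice).getD "CustomField" []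
  [("order_no", pvLastVal "order number" cfs.reverse),
   ("po_no", pvLastVal "po number" cfs.reverse),
   ("quote_no", pvLastVal "quote number" cfs.reverse)]

-- ===== PRECONDITION & SPEC =====
def Spec_extract_custom_fields (invoice : List (String × List (List (String × String)))) (out : List (String × String)) : Prop := out = extract_custom_fields_alt invoice
instance (invoice : List (String × List (List (String × String)))) (out : List (String × String)) : Decidable (Spec_extract_custom_fields invoice out) := by unfold Spec_extract_custom_fields; infer_instance

-- ===== CLAIM (what is proved, stated in full; the proofs are below) =====
def Claim_equal_extract_custom_fields : Prop := ∀ (invoice : List (String × List (List (String × String)))), Dom_extract_custom_fields invoice → Spec_extract_custom_fields invoice (extract_custom_fields invoice)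

-- ===== LEMMAS AND PROOFS =====

-- A's field_map, evaluated to a literal dict
theorem pv_fm :
    PySem.Dict.ofList (pvSearchFields.map (fun f => (PySem.Str.lower f, f)))
      = PySem.Dict.mk [("order number", "Order Number"), ("po number", "PO Number"),
                       ("quote number", "Quote Number")] := by decide

-- one step of A's loop, read off componentwise
theorem pv_step (cf : List (String × String)) (vA : PySem.Dict String String) :
    (if (PySem.Dict.ofList (pvSearchFields.map (fun f => (PySem.Str.lower f, f)))).contains (pvName cf)
     then vA.insert ((PySem.Dict.ofList (pvSearchFields.map (fun f => (PySem.Str.lower f, f)))).getD (pvName cf) "") (pvSV cf)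
     else vA).getD pvFieldOrder ""
      = (if pvName cf = "order number" then pvSV cf else vA.getD pvFieldOrder "") ∧
    (if (PySem.Dict.ofList (pvSearchFields.map (fun f => (PySem.Str.lower f, f)))).contains (pvName cf)
     then vA.insert ((PySem.Dict.ofList (pvSearchFields.map (fun f => (PySem.Str.lower f, f)))).getD (pvName cf) "") (pvSV cf)
     else vA).getD pvFieldPO ""
      = (if pvName cf = "po number" then pvSV cf else vA.getD pvFieldPO "") ∧
    (if (PySem.Dict.ofList (pvSearchFields.map (fun f => (PySem.Str.lower f, f)))).contains (pvName cf)
     then vA.insert ((PySem.Dict.ofList (pvSearchFields.map (fun f => (PySem.Str.lower f, f)))).getD (pvName cf) "") (pvSV cf)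
     else vA).getD pvFieldQuote ""
      = (if pvName cf = "quote number" then pvSV cf else vA.getD pvFieldQuote "") := by
  rw [pv_fm]
  by_cases ho : pvName cf = "order number"
  · rw [ho]
    simp [PySem.Dict.getD_eq_get?_getD, PySem.Dict.get?_mk_cons, PySem.Dict.get?_insert,
          pvFieldOrder, pvFieldPO, pvFieldQuote]
  by_cases hp : pvName cf = "po number"
  · rw [hp]
    simp [PySem.Dict.getD_eq_get?_getD, PySem.Dict.get?_mk_cons, PySem.Dict.get?_insert,
          pvFieldOrder, pvFieldPO, pvFieldQuote]
  by_cases hq : pvName cf = "quote number"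
  · rw [hq]
    simp [PySem.Dict.getD_eq_get?_getD, PySem.Dict.get?_mk_cons, PySem.Dict.get?_insert,
          pvFieldOrder, pvFieldPO, pvFieldQuote]
  · have hc : (PySem.Dict.mk [("order number", "Order Number"), ("po number", "PO Number"),
        ("quote number", "Quote Number")] : PySem.Dict String String).contains (pvName cf) = false := by
      simp [PySem.Dict.contains_mk]
      exact ⟨fun h => ho h.symm, fun h => hp h.symm, fun h => hq h.symm⟩
    rw [hc]
    simp only [Bool.false_eq_true, if_false]
    rw [if_neg ho, if_neg hp, if_neg hq]
    exact ⟨rfl, rfl, rfl⟩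

-- the invariant: after A's forward loop, each tracked slot holds the value of the last
-- matching custom field, i.e. B's backward scan (reverse induction on the list)
theorem pv_inv (cfs : List (List (String × String))) :
    (cfs.foldl (fun v cf =>
        if (PySem.Dict.ofList (pvSearchFields.map (fun f => (PySem.Str.lower f, f)))).contains (pvName cf)
        then v.insert ((PySem.Dict.ofList (pvSearchFields.map (fun f => (PySem.Str.lower f, f)))).getD (pvName cf) "") (pvSV cf)
        else v) (PySem.Dict.ofList (pvSearchFields.map (fun f => (f, ""))))).getD pvFieldOrder ""
      = pvLastVal "order number" cfs.reverse ∧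
    (cfs.foldl (fun v cf =>
        if (PySem.Dict.ofList (pvSearchFields.map (fun f => (PySem.Str.lower f, f)))).contains (pvName cf)
        then v.insert ((PySem.Dict.ofList (pvSearchFields.map (fun f => (PySem.Str.lower f, f)))).getD (pvName cf) "") (pvSV cf)
        else v) (PySem.Dict.ofList (pvSearchFields.map (fun f => (f, ""))))).getD pvFieldPO ""
      = pvLastVal "po number" cfs.reverse ∧
    (cfs.foldl (fun v cf =>
        if (PySem.Dict.ofList (pvSearchFields.map (fun f => (PySem.Str.lower f, f)))).contains (pvName cf)
        then v.insert ((PySem.Dict.ofList (pvSearchFields.map (fun f => (PySem.Str.lower f, f)))).getD (pvName cf) "") (pvSV cf)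
        else v) (PySem.Dict.ofList (pvSearchFields.map (fun f => (f, ""))))).getD pvFieldQuote ""
      = pvLastVal "quote number" cfs.reverse := by
  induction cfs using List.reverseRecOn with
  | nil => exact ⟨by decide, by decide, by decide⟩
  | append_singleton l cf ih =>
    obtain ⟨i1, i2, i3⟩ := ih
    simp only [List.foldl_append, List.foldl_cons, List.foldl_nil, List.reverse_append,
               List.reverse_cons, List.reverse_nil, List.nil_append, List.cons_append,
               pvLastVal]
    obtain ⟨s1, s2, s3⟩ := pv_step cf
      (l.foldl (fun v cf =>
        if (PySem.Dict.ofList (pvSearchFields.map (fun f => (PySem.Str.lower f, f)))).contains (pvName cf)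
        then v.insert ((PySem.Dict.ofList (pvSearchFields.map (fun f => (PySem.Str.lower f, f)))).getD (pvName cf) "") (pvSV cf)
        else v) (PySem.Dict.ofList (pvSearchFields.map (fun f => (f, "")))))
    rw [s1, s2, s3, i1, i2, i3]
    exact ⟨rfl, rfl, rfl⟩

-- ===== VERDICT (by name: the statement is the Claim_ definition above) =====
theorem extract_custom_fields_spec : Claim_equal_extract_custom_fields := by
  intro invoice _
  unfold Spec_extract_custom_fields extract_custom_fields extract_custom_fields_alt
  obtain ⟨e1, e2, e3⟩ := pv_inv ((PySem.Dict.mk invoice).getD "CustomField" [])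
  simp only [e1, e2, e3]
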